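-- pv_equiv track=rewrite | github.com/joshanashakya/dissertation | workspace/dataset/java-python/GeeksForGeeks/1028/A/2.py | composite_factors
-- ===== SOURCE A (Python) =====
-- def composite_factors(n) :
--
--     count = 0;
--
--     # Initialise array with 0
--     a = [0]*(n + 1) ;
--
--     for i in range(1, n + 1) :
--         if (n % i == 0) :
--
--             # Stored i value into an array
--             a[i] = i;
--
--     # Every non-zero value at a[i] denotes
--     # that i is a factor of n
--     for i in range(2,n + 1) :
--         j = 2;
--         p = 1;
--
--         # Find if i is prime
--         while (j < a[i]) :
--             if (a[i] % j == 0) :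
--                 p = 0;
--                 break;
--
--             j += 1;
--
--
--         # If i is a factor of n
--         # and i is not prime
--         if (p == 0 and a[i] != 0) :
--             count += 1;
--
--     return count;
-- ===== SOURCE B (Python) =====
-- def composite_factors(n):
--     # Enumerate divisors in pairs up to sqrt(n), then count the composite ones.
--     divs = set()
--     i = 1
--     while i * i <= n:
--         if n % i == 0:
--             divs.add(i)
--             divs.add(n // i)
--         i += 1
--     return sum(1 for d in divs if _is_composite(d))
--
--
-- def _is_composite(d):
--     if d < 4:
--         return False
--     j = 2
--     while j * j <= d:
--         if d % j == 0:
--             return True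
--         j += 1
--     return False
-- ===== Notes on version B (the rewrite author's own statement) =====
-- stated objective: faster
-- what changed: Replaces A's size-(n+1) factor table plus per-candidate trial division over all of [2, i) by paired divisor enumeration up to sqrt(n) collected in a set, with sqrt-bounded primality tests per divisor.
import Mathlib
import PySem

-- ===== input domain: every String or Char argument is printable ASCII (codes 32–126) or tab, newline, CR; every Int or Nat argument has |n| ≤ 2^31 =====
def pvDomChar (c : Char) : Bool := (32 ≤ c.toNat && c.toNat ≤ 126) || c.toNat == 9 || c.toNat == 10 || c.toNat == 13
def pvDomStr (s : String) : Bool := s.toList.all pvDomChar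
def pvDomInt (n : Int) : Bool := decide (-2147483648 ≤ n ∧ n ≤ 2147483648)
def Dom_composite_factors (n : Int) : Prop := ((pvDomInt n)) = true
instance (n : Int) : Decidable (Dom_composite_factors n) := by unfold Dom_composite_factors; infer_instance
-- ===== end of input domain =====

-- B replaces A's O(n)-size table + per-divisor trial division over [2, d) by paired divisor
-- enumeration up to sqrt(n) with sqrt-bounded primality tests (objective: faster, asymptotic).

-- ===== PORT A =====
-- while (j < ai): if ai % j == 0: p = 0; break; j += 1   — returns the final p
def cfPrimeLoop (ai j : Int) : Int :=
  if j < ai then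
    if PySem.Int.mod ai j = 0 then 0 else cfPrimeLoop ai (j + 1)
  else 1
termination_by (ai - j).toNat
decreasing_by omega

def composite_factors (n : Int) : Int :=
  let a0 : List Int := List.replicate (n + 1).toNat 0      -- [0]*(n+1) (empty when n+1 ≤ 0, as in Python)
  let a := (PySem.List.pyRange 1 (n + 1) 1).foldl
    (fun a i => if PySem.Int.mod n i = 0 then PySem.List.pySetD a i i else a) a0
  (PySem.List.pyRange 2 (n + 1) 1).foldl
    (fun count i =>
      let ai := PySem.List.pyGetD a i 0                    -- a[i]; index 2 ≤ i ≤ n is in range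
      let p := cfPrimeLoop ai 2
      if p = 0 ∧ ai ≠ 0 then count + 1 else count) 0

-- ===== PORT B =====
-- while i*i <= n: if n % i == 0: divs.add(i); divs.add(n//i); i += 1
def cfDivLoop (n i : Int) (divs : PySem.Set Int) : PySem.Set Int :=
  if i * i ≤ n then
    cfDivLoop n (i + 1)
      (if PySem.Int.mod n i = 0
       then PySem.Set.add (PySem.Set.add divs i) (PySem.Int.floordiv n i)
       else divs)
  else divs
termination_by (n + 1 - i).toNat
decreasing_by
  have h1 : 2 * i - 1 ≤ i * i := by nlinarith
  have h2 : 0 ≤ i * i := mul_self_nonneg i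
  omega

-- while j*j <= d: if d % j == 0: return True; j += 1; return False
def cfCompLoop (d j : Int) : Bool :=
  if j * j ≤ d then
    if PySem.Int.mod d j = 0 then true else cfCompLoop d (j + 1)
  else false
termination_by (d + 1 - j).toNat
decreasing_by
  have h1 : 2 * j - 1 ≤ j * j := by nlinarith
  have h2 : 0 ≤ j * j := mul_self_nonneg j
  omega

def cfIsComposite (d : Int) : Bool :=
  if d < 4 then false else cfCompLoop d 2

def composite_factors_alt (n : Int) : Int :=
  let divs := cfDivLoop n 1 PySem.Set.empty
  -- sum(1 for d in divs if _is_composite(d)) — order-independent consumption of the set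
  divs.foldl (fun c d => if cfIsComposite d then c + 1 else c) 0

-- ===== PRECONDITION & SPEC =====
def Spec_composite_factors (n : Int) (out : Int) : Prop := out = composite_factors_alt n
instance (n : Int) (out : Int) : Decidable (Spec_composite_factors n out) := by unfold Spec_composite_factors; infer_instance

-- ===== CLAIM (what is proved, stated in full; the proofs are below) =====
def Claim_equal_composite_factors : Prop := ∀ (n : Int), Dom_composite_factors n → Spec_composite_factors n (composite_factors n)

-- ===== LEMMAS AND PROOFS =====

lemma pyGetD_replicate (m : Nat) (k : Int) :
    PySem.List.pyGetD (List.replicate m (0 : Int)) k 0 = 0 := by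
  simp only [PySem.List.pyGetD, PySem.List.pyGet?]
  cases h : PySem.List.pyIdx? (List.replicate m (0 : Int)).length k <;>
    simp [List.getElem?_replicate] <;> split <;> simp

-- the final table of A's first loop, looked up at a nonnegative index k
lemma loop1_lookup (n : Int) : ∀ (L : List Int) (a : List Int) (k : Int),
    (∀ i ∈ L, 0 ≤ i) → 0 ≤ k →
    PySem.List.pyGetD
      (L.foldl (fun a i => if PySem.Int.mod n i = 0 then PySem.List.pySetD a i i else a) a) k 0
    = if k ∈ L ∧ PySem.Int.mod n k = 0 ∧ k.toNat < a.length then k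
      else PySem.List.pyGetD a k 0 := by
  intro L
  induction L with
  | nil => intro a k _ _; simp
  | cons i L ih =>
    intro a k hL hk
    have hi : 0 ≤ i := hL i (List.mem_cons_self ..)
    have hL' : ∀ x ∈ L, 0 ≤ x := fun x hx => hL x (List.mem_cons_of_mem _ hx)
    simp only [List.foldl_cons]
    by_cases hmi : PySem.Int.mod n i = 0
    · rw [if_pos hmi, ih (PySem.List.pySetD a i i) k hL' hk, PySem.List.length_pySetD]
      rw [PySem.List.pySetD_of_nonneg a i hi, PySem.List.pyGetD_of_nonneg _ 0 hk,
          PySem.List.pyGetD_of_nonneg a 0 hk]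
      by_cases hc : k ∈ L ∧ PySem.Int.mod n k = 0 ∧ k.toNat < a.length
      · rw [if_pos hc, if_pos ⟨List.mem_cons_of_mem _ hc.1, hc.2⟩]
      · rw [if_neg hc]
        by_cases hki : k = i
        · subst hki
          by_cases hlen : k.toNat < a.length
          · rw [if_pos ⟨List.mem_cons_self .., hmi, hlen⟩]
            simp [List.getD_eq_getElem?_getD, hlen]
          · rw [if_neg (by rintro ⟨_, _, h⟩; exact hlen h)]
            have h1 : a.length ≤ k.toNat := by omega
            simp [List.getD_eq_getElem?_getD, h1, List.set_eq_of_length_le h1]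
        · have hne : k.toNat ≠ i.toNat := by omega
          rw [List.getD_eq_getElem?_getD, List.getElem?_set_ne (Ne.symm hne),
              ← List.getD_eq_getElem?_getD]
          rw [if_neg ?_]
          rintro ⟨h1, h2, h3⟩
          rcases List.mem_cons.mp h1 with h | h
          · exact hki h
          · exact hc ⟨h, h2, h3⟩
    · rw [if_neg hmi, ih a k hL' hk]
      by_cases hc : k ∈ L ∧ PySem.Int.mod n k = 0 ∧ k.toNat < a.length
      · rw [if_pos hc, if_pos ⟨List.mem_cons_of_mem _ hc.1, hc.2⟩]
      · rw [if_neg hc, if_neg ?_]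
        rintro ⟨h1, h2, h3⟩
        rcases List.mem_cons.mp h1 with h | h
        · exact hmi (h ▸ h2)
        · exact hc ⟨h, h2, h3⟩

-- characterisation of A's inner while loop
lemma cfPrimeLoop_eq_zero_iff (ai : Int) : ∀ (j : Int),
    cfPrimeLoop ai j = 0 ↔ ∃ m, j ≤ m ∧ m < ai ∧ PySem.Int.mod ai m = 0 := by
  have H : ∀ (N : Nat) (j : Int), (ai - j).toNat ≤ N →
      (cfPrimeLoop ai j = 0 ↔ ∃ m, j ≤ m ∧ m < ai ∧ PySem.Int.mod ai m = 0) := by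
    intro N
    induction N with
    | zero =>
      intro j hj
      have h : ¬ j < ai := by omega
      rw [cfPrimeLoop, if_neg h]
      exact ⟨fun h1 => by omega, fun ⟨m, h1, h2, _⟩ => by omega⟩
    | succ N ih =>
      intro j hj
      rw [cfPrimeLoop]
      by_cases h : j < ai
      · rw [if_pos h]
        by_cases hm : PySem.Int.mod ai j = 0
        · rw [if_pos hm]
          exact ⟨fun _ => ⟨j, le_refl _, h, hm⟩, fun _ => rfl⟩
        · rw [if_neg hm, ih (j + 1) (by omega)]
          constructor
          · rintro ⟨m, h1, h2, h3⟩; exact ⟨m, by omega, h2, h3⟩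
          · rintro ⟨m, h1, h2, h3⟩
            rcases eq_or_lt_of_le h1 with h4 | h4
            · exact absurd (h4 ▸ h3) hm
            · exact ⟨m, by omega, h2, h3⟩
      · rw [if_neg h]
        exact ⟨fun h1 => by omega, fun ⟨m, h1, h2, _⟩ => by omega⟩
  intro j; exact H (ai - j).toNat j le_rfl

-- characterisation of B's trial-division loop (for start values j ≥ 1)
lemma cfCompLoop_eq_true_iff (d : Int) : ∀ (j : Int), 1 ≤ j →
    (cfCompLoop d j = true ↔ ∃ m, j ≤ m ∧ m * m ≤ d ∧ PySem.Int.mod d m = 0) := by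
  have H : ∀ (N : Nat) (j : Int), 1 ≤ j → (d + 1 - j).toNat ≤ N →
      (cfCompLoop d j = true ↔ ∃ m, j ≤ m ∧ m * m ≤ d ∧ PySem.Int.mod d m = 0) := by
    intro N
    induction N with
    | zero =>
      intro j hj1 hj
      have hj' : d + 1 ≤ j := by omega
      have hjj : j ≤ j * j := le_mul_of_one_le_left (by omega) hj1
      have hg : ¬ j * j ≤ d := by linarith
      rw [cfCompLoop, if_neg hg]
      constructor
      · intro h1; simp at h1
      · rintro ⟨m, h1, h2, _⟩
        have hmm : m ≤ m * m := le_mul_of_one_le_left (by omega) (by omega)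
        linarith
    | succ N ih =>
      intro j hj1 hj
      rw [cfCompLoop]
      by_cases hg : j * j ≤ d
      · rw [if_pos hg]
        by_cases hm : PySem.Int.mod d j = 0
        · rw [if_pos hm]
          exact ⟨fun _ => ⟨j, le_refl _, hg, hm⟩, fun _ => rfl⟩
        · rw [if_neg hm, ih (j + 1) (by omega) (by omega)]
          constructor
          · rintro ⟨m, h1, h2, h3⟩; exact ⟨m, by omega, h2, h3⟩
          · rintro ⟨m, h1, h2, h3⟩
            rcases eq_or_lt_of_le h1 with h4 | h4
            · exact absurd (h4 ▸ h3) hm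
            · exact ⟨m, by omega, h2, h3⟩
      · rw [if_neg hg]
        constructor
        · intro h1; simp at h1
        · rintro ⟨m, h1, h2, _⟩
          have hjm : j * j ≤ m * m := mul_le_mul h1 h1 (by omega) (by omega)
          linarith
  intro j hj1; exact H (d + 1 - j).toNat j hj1 le_rfl

-- sqrt-bounded compositeness test agrees with A's full trial division
lemma isComposite_iff (d : Int) :
    cfIsComposite d = true ↔ ∃ m, 2 ≤ m ∧ m < d ∧ PySem.Int.mod d m = 0 := by
  unfold cfIsComposite
  by_cases h4 : d < 4
  · rw [if_pos h4]
    constructor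
    · intro h; simp at h
    · rintro ⟨m, h1, h2, h3⟩
      exfalso
      have hd3 : d = 3 := by omega
      have hm2 : m = 2 := by omega
      rw [hd3, hm2] at h3
      exact absurd h3 (by decide)
  · rw [if_neg h4, cfCompLoop_eq_true_iff d 2 (by omega)]
    constructor
    · rintro ⟨m, h1, h2, h3⟩
      refine ⟨m, h1, by nlinarith, h3⟩
    · rintro ⟨m, h1, h2, h3⟩
      rw [PySem.Int.mod_eq_zero_iff_dvd] at h3
      by_cases hm2 : m * m ≤ d
      · exact ⟨m, h1, hm2, (PySem.Int.mod_eq_zero_iff_dvd d m).mpr h3⟩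
      · push_neg at hm2
        have hdm : d / m * m = d := Int.ediv_mul_cancel h3
        set q := d / m with hq
        have hm0 : (0 : Int) < m := by omega
        have hq2 : 2 ≤ q := by nlinarith
        have hqd : q ∣ d := ⟨m, hdm.symm⟩
        have hqlt : q < m := by nlinarith
        exact ⟨q, hq2, by nlinarith, (PySem.Int.mod_eq_zero_iff_dvd d q).mpr hqd⟩

lemma mem_cfDivLoop (n : Int) : ∀ (i : Int) (s : PySem.Set Int) (d : Int), 1 ≤ i →
    (d ∈ cfDivLoop n i s ↔
      d ∈ s ∨ ∃ k, i ≤ k ∧ k * k ≤ n ∧ PySem.Int.mod n k = 0 ∧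
        (d = k ∨ d = PySem.Int.floordiv n k)) := by
  have H : ∀ (N : Nat) (i : Int) (s : PySem.Set Int) (d : Int), 1 ≤ i → (n + 1 - i).toNat ≤ N →
      (d ∈ cfDivLoop n i s ↔
        d ∈ s ∨ ∃ k, i ≤ k ∧ k * k ≤ n ∧ PySem.Int.mod n k = 0 ∧
          (d = k ∨ d = PySem.Int.floordiv n k)) := by
    intro N
    induction N with
    | zero =>
      intro i s d hi hN
      have hi' : n + 1 ≤ i := by omega
      have hii : i ≤ i * i := le_mul_of_one_le_left (by omega) hi
      have hg : ¬ i * i ≤ n := by linarith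
      rw [cfDivLoop, if_neg hg]
      constructor
      · intro h; exact Or.inl h
      · rintro (h | ⟨k, h1, h2, _, _⟩)
        · exact h
        · have hkk : k ≤ k * k := le_mul_of_one_le_left (by omega) (by omega)
          linarith
    | succ N ih =>
      intro i s d hi hN
      rw [cfDivLoop]
      by_cases hg : i * i ≤ n
      · rw [if_pos hg]
        have hii : i ≤ i * i := le_mul_of_one_le_left (by omega) hi
        have hin : i ≤ n := by linarith
        rw [ih (i + 1) _ d (by omega) (by omega)]
        by_cases hmi : PySem.Int.mod n i = 0
        · rw [if_pos hmi]
          simp only [PySem.Set.mem_add]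
          constructor
          · rintro (((h | h) | h) | ⟨k, h1, h2, h3, h4⟩)
            · exact Or.inl h
            · exact Or.inr ⟨i, le_refl _, hg, hmi, Or.inl h⟩
            · exact Or.inr ⟨i, le_refl _, hg, hmi, Or.inr h⟩
            · exact Or.inr ⟨k, by omega, h2, h3, h4⟩
          · rintro (h | ⟨k, h1, h2, h3, h4⟩)
            · exact Or.inl (Or.inl (Or.inl h))
            · rcases eq_or_lt_of_le h1 with h5 | h5
              · subst h5
                rcases h4 with h4 | h4
                · exact Or.inl (Or.inl (Or.inr h4))
                · exact Or.inl (Or.inr h4)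
              · exact Or.inr ⟨k, by omega, h2, h3, h4⟩
        · rw [if_neg hmi]
          constructor
          · rintro (h | ⟨k, h1, h2, h3, h4⟩)
            · exact Or.inl h
            · exact Or.inr ⟨k, by omega, h2, h3, h4⟩
          · rintro (h | ⟨k, h1, h2, h3, h4⟩)
            · exact Or.inl h
            · rcases eq_or_lt_of_le h1 with h5 | h5
              · exact absurd (h5 ▸ h3) hmi
              · exact Or.inr ⟨k, by omega, h2, h3, h4⟩
      · rw [if_neg hg]
        constructor
        · intro h; exact Or.inl h
        · rintro (h | ⟨k, h1, h2, _, _⟩)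
          · exact h
          · have hik : i * i ≤ k * k := mul_le_mul h1 h1 (by omega) (by omega)
            linarith
  intro i s d hi; exact H (n + 1 - i).toNat i s d hi le_rfl

lemma nodup_cfDivLoop (n : Int) : ∀ (i : Int) (s : PySem.Set Int), 1 ≤ i → s.Nodup →
    (cfDivLoop n i s).Nodup := by
  have H : ∀ (N : Nat) (i : Int) (s : PySem.Set Int), 1 ≤ i → (n + 1 - i).toNat ≤ N →
      s.Nodup → (cfDivLoop n i s).Nodup := by
    intro N
    induction N with
    | zero =>
      intro i s hi hN hs
      have hi' : n + 1 ≤ i := by omega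
      have hii : i ≤ i * i := le_mul_of_one_le_left (by omega) hi
      rw [cfDivLoop, if_neg (by linarith)]
      exact hs
    | succ N ih =>
      intro i s hi hN hs
      rw [cfDivLoop]
      by_cases hg : i * i ≤ n
      · rw [if_pos hg]
        refine ih (i + 1) _ (by omega) (by omega) ?_
        by_cases hmi : PySem.Int.mod n i = 0
        · rw [if_pos hmi]
          exact PySem.Set.nodup_add _ _ (PySem.Set.nodup_add _ _ hs)
        · rw [if_neg hmi]; exact hs
      · rw [if_neg hg]; exact hs
  intro i s hi hs; exact H (n + 1 - i).toNat i s hi le_rfl hs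

-- B's set is exactly the positive divisors of n (empty when n ≤ 0)
lemma mem_divs (n d : Int) :
    d ∈ cfDivLoop n 1 PySem.Set.empty ↔ 1 ≤ n ∧ 1 ≤ d ∧ d ∣ n := by
  rw [mem_cfDivLoop n 1 PySem.Set.empty d le_rfl]
  constructor
  · rintro (h | ⟨k, h1, h2, h3, h4⟩)
    · exact absurd h List.not_mem_nil
    · rw [PySem.Int.mod_eq_zero_iff_dvd] at h3
      have hkk : k ≤ k * k := le_mul_of_one_le_left (by omega) h1
      have hn1 : 1 ≤ n := by linarith
      have hk0 : (0 : Int) < k := by omega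
      have hfd : PySem.Int.floordiv n k = n / k := PySem.Int.floordiv_eq_ediv_of_pos hk0
      have hkn : k ≤ n := Int.le_of_dvd (by omega) h3
      rcases h4 with h4 | h4
      · exact ⟨hn1, h4 ▸ h1, h4 ▸ h3⟩
      · rw [hfd] at h4
        have hdvd : n / k ∣ n := ⟨k, (Int.ediv_mul_cancel h3).symm⟩
        have hge : 1 ≤ n / k := (Int.le_ediv_iff_mul_le hk0).mpr (by omega)
        exact ⟨hn1, h4 ▸ hge, h4 ▸ hdvd⟩
  · rintro ⟨hn1, hd1, hdvd⟩
    right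
    have hdn : d ≤ n := Int.le_of_dvd (by omega) hdvd
    by_cases hdd : d * d ≤ n
    · exact ⟨d, hd1, hdd, (PySem.Int.mod_eq_zero_iff_dvd n d).mpr hdvd, Or.inl rfl⟩
    · push_neg at hdd
      have hnd : n / d * d = n := Int.ediv_mul_cancel hdvd
      set q := n / d with hq
      have hq1 : 1 ≤ q := (Int.le_ediv_iff_mul_le (by omega)).mpr (by omega)
      have hqlt : q < d := by nlinarith
      have hqq : q * q ≤ n := by nlinarith
      have hqdvd : q ∣ n := ⟨d, hnd.symm⟩
      refine ⟨q, hq1, hqq, (PySem.Int.mod_eq_zero_iff_dvd n q).mpr hqdvd, Or.inr ?_⟩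
      rw [PySem.Int.floordiv_eq_ediv_of_pos (by omega : (0:Int) < q), ← hnd,
          Int.mul_ediv_cancel_left d (by omega : q ≠ 0)]

-- A's result is the count of composite divisors among 2..n
lemma A_eq_countP (n : Int) :
    composite_factors n
      = (((PySem.List.pyRange 2 (n + 1) 1).countP
          (fun i => decide (PySem.Int.mod n i = 0) && cfIsComposite i) : Nat) : Int) := by
  show (PySem.List.pyRange 2 (n + 1) 1).foldl
      (fun count i =>
        let ai := PySem.List.pyGetD
          ((PySem.List.pyRange 1 (n + 1) 1).foldl
            (fun a i => if PySem.Int.mod n i = 0 then PySem.List.pySetD a i i else a)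
            (List.replicate (n + 1).toNat 0)) i 0
        let p := cfPrimeLoop ai 2
        if p = 0 ∧ ai ≠ 0 then count + 1 else count) 0
    = _
  rw [PySem.List.foldl_congr_mem _ _
      (fun count i => if (decide (PySem.Int.mod n i = 0) && cfIsComposite i) = true
                      then count + 1 else count) 0 ?_]
  · rw [PySem.List.foldl_count_if, zero_add]
  · intro acc x hx
    have hx2 : 2 ≤ x ∧ x < n + 1 := PySem.List.mem_pyRange_one.mp hx
    dsimp only
    rw [loop1_lookup n _ _ x
        (fun y hy => by have := PySem.List.mem_pyRange_one.mp hy; omega) (by omega),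
        List.length_replicate]
    by_cases hm : PySem.Int.mod n x = 0
    · have hcnd : x ∈ PySem.List.pyRange 1 (n + 1) 1 ∧ PySem.Int.mod n x = 0
          ∧ x.toNat < (n + 1).toNat :=
        ⟨PySem.List.mem_pyRange_one.mpr ⟨by omega, by omega⟩, hm, by omega⟩
      rw [if_pos hcnd]
      have hiff : (cfPrimeLoop x 2 = 0 ∧ x ≠ 0)
          ↔ (decide (PySem.Int.mod n x = 0) && cfIsComposite x) = true := by
        simp only [cfPrimeLoop_eq_zero_iff, Bool.and_eq_true, decide_eq_true_eq,
                   isComposite_iff, hm, true_and]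
        constructor
        · rintro ⟨h, _⟩; exact h
        · intro h; exact ⟨h, by omega⟩
      exact if_congr hiff rfl rfl
    · have hncnd : ¬ (x ∈ PySem.List.pyRange 1 (n + 1) 1 ∧ PySem.Int.mod n x = 0
          ∧ x.toNat < (n + 1).toNat) := by rintro ⟨_, h, _⟩; exact hm h
      rw [if_neg hncnd, pyGetD_replicate]
      rw [if_neg ?_, if_neg (by simp [hm])]
      rintro ⟨h1, _⟩
      rw [cfPrimeLoop] at h1
      norm_num at h1

-- B's result is the count of composite elements of its divisor set
lemma B_eq_countP (n : Int) :
    composite_factors_alt n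
      = (((cfDivLoop n 1 PySem.Set.empty).countP cfIsComposite : Nat) : Int) := by
  show (cfDivLoop n 1 PySem.Set.empty).foldl
      (fun c d => if cfIsComposite d then c + 1 else c) 0 = _
  rw [PySem.List.foldl_count_if, zero_add]

-- ===== VERDICT (by name: the statement is the Claim_ definition above) =====
theorem composite_factors_spec : Claim_equal_composite_factors := by
  intro n _
  show composite_factors n = composite_factors_alt n
  rw [A_eq_countP, B_eq_countP]
  refine congrArg Nat.cast ?_
  rw [List.countP_eq_length_filter, List.countP_eq_length_filter]
  apply List.Perm.length_eq
  rw [List.perm_ext_iff_of_nodup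
      (List.Nodup.filter _ (PySem.List.nodup_pyRange_one 2 (n + 1)))
      (List.Nodup.filter _ (nodup_cfDivLoop n 1 PySem.Set.empty le_rfl List.nodup_nil))]
  intro x
  simp only [List.mem_filter, PySem.List.mem_pyRange_one, mem_divs, Bool.and_eq_true,
             decide_eq_true_eq]
  constructor
  · rintro ⟨⟨h1, h2⟩, h3, h4⟩
    rw [PySem.Int.mod_eq_zero_iff_dvd] at h3
    exact ⟨⟨by omega, by omega, h3⟩, h4⟩
  · rintro ⟨⟨h1, h2, h3⟩, h4⟩
    have hx4 : ¬ x < 4 := by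
      intro hlt
      unfold cfIsComposite at h4
      rw [if_pos hlt] at h4
      simp at h4
    have hxn : x ≤ n := Int.le_of_dvd (by omega) h3
    exact ⟨⟨by omega, by omega⟩, (PySem.Int.mod_eq_zero_iff_dvd n x).mpr h3, h4⟩
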